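-- pv_equiv track=rewrite | github.com/sjrgame/shijingrong | Protocol/dl645.py | FiledParsingYYMMDDWW
-- ===== SOURCE A (Python) =====
-- def FiledParsingYYMMDDWW(data):
--     if len(data) != 8:
--         return 'Cannot Parse The data: ' + data
--     strValue = ''
--     for i in range(len(data)-1,-1,-2):
--         strValue +=data[i-1]
--         strValue +=data[i]
--     return strValue
-- ===== SOURCE B (Python) =====
-- def FiledParsingYYMMDDWW(data):
--     if len(data) != 8:
--         return 'Cannot Parse The data: ' + data
--     chunks = [data[i:i+2] for i in range(0, 8, 2)]
--     return ''.join(reversed(chunks))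
-- ===== Notes on version B (the rewrite author's own statement) =====
-- stated objective: simpler
-- what changed: B splits the string into four 2-char chunks going forward, reverses the list of chunks and joins, instead of stepping an index backward and appending single characters to an accumulator.
import Mathlib
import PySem

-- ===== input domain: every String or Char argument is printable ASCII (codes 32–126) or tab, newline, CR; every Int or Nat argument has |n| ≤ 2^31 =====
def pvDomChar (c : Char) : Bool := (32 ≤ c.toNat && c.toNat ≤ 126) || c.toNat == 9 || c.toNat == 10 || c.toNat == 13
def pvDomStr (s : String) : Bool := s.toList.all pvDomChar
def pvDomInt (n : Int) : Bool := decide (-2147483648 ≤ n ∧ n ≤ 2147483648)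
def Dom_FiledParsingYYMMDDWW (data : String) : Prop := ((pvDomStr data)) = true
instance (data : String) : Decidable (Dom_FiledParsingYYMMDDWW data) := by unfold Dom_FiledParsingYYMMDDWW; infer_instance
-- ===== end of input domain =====

-- B swaps A's backward index walk with char-by-char accumulation for a forward
-- chunk split, a list reversal and a join (objective: simpler decomposition).

-- ===== PORT A =====
-- backward loop: for i in range(len(data)-1, -1, -2): strValue += data[i-1]; strValue += data[i]
def FiledParsingYYMMDDWW (data : String) : String :=
  let cs := data.toList
  if cs.length ≠ 8 then
    String.ofList ("Cannot Parse The data: ".toList ++ cs)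
  else
    let strValue :=
      (PySem.List.pyRange ((cs.length : Int) - 1) (-1) (-2)).foldl
        (fun acc i => acc ++ [PySem.List.pyGetD cs (i - 1) ' ', PySem.List.pyGetD cs i ' ']) []
    String.ofList strValue

-- ===== PORT B =====
-- forward chunks of 2, reverse the list of chunks, join
def FiledParsingYYMMDDWW_alt (data : String) : String :=
  let cs := data.toList
  if cs.length ≠ 8 then
    String.ofList ("Cannot Parse The data: ".toList ++ cs)
  else
    let chunks := (PySem.List.pyRange 0 8 2).map (fun i => PySem.List.slice cs (some i) (some (i + 2)))
    String.ofList chunks.reverse.flatten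

-- ===== PRECONDITION & SPEC =====
def Spec_FiledParsingYYMMDDWW (data : String) (out : String) : Prop := out = FiledParsingYYMMDDWW_alt data
instance (data : String) (out : String) : Decidable (Spec_FiledParsingYYMMDDWW data out) := by unfold Spec_FiledParsingYYMMDDWW; infer_instance

-- ===== CLAIM (what is proved, stated in full; the proofs are below) =====
def Claim_equal_FiledParsingYYMMDDWW : Prop := ∀ (data : String), Dom_FiledParsingYYMMDDWW data → Spec_FiledParsingYYMMDDWW data (FiledParsingYYMMDDWW data)

-- ===== LEMMAS AND PROOFS =====
theorem pv_eq (data : String) : FiledParsingYYMMDDWW data = FiledParsingYYMMDDWW_alt data := by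
  unfold FiledParsingYYMMDDWW FiledParsingYYMMDDWW_alt
  generalize data.toList = cs
  by_cases h : cs.length = 8
  · obtain ⟨a, b, c, d, e, f, g, k, rfl⟩ :
        ∃ a b c d e f g k, cs = [a, b, c, d, e, f, g, k] := by
      rcases cs with _ | ⟨a, _ | ⟨b, _ | ⟨c, _ | ⟨d, _ | ⟨e, _ | ⟨f, _ | ⟨g, _ | ⟨k, _ | ⟨m, t⟩⟩⟩⟩⟩⟩⟩⟩⟩ <;>
        simp_all
    simp [PySem.List.pyRange, PySem.List.pyGetD, PySem.List.pyGet?, PySem.List.pyIdx?, PySem.List.slice, PySem.List.clampIdx, List.range_succ]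
  · rw [if_pos h, if_pos h]

-- ===== VERDICT (by name: the statement is the Claim_ definition above) =====
theorem FiledParsingYYMMDDWW_spec : Claim_equal_FiledParsingYYMMDDWW := by
  intro data _
  unfold Spec_FiledParsingYYMMDDWW
  exact pv_eq data
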